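-- pv_equiv track=rewrite | github.com/Bryan-9603012/2026-python | weeks/week-07/solutions/1114405023/10170/main.py | people_on_day
-- ===== SOURCE A (Python) =====
-- def people_on_day(s: int, d: int) -> int:
--     low, high = s, s
--     def total(n: int) -> int:
--         return n * (n + 1) // 2 - (s - 1) * s // 2
--     while total(high) < d:
--         high *= 2
--     while low < high:
--         mid = (low + high) // 2
--         if total(mid) >= d:
--             high = mid
--         else:
--             low = mid + 1
--     return low
-- ===== SOURCE B (Python) =====
-- def people_on_day(s: int, d: int) -> int:
--     # simple forward accumulation: first day n >= s whose running total reaches d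
--     n, t = s, s
--     while t < d:
--         n += 1
--         t += n
--     return n
-- ===== Notes on version B (the rewrite author's own statement) =====
-- stated objective: simpler
-- what changed: Replaces the exponential-doubling upper-bound search plus binary search with a single forward accumulation loop that adds each day's count until the running total reaches d.
-- outside the precondition, e.g. on people_on_day(0, 1): A does not finish within the time limit, B returns 1; on people_on_day(-5, 3): A returns -5, B returns 6
import Mathlib
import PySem

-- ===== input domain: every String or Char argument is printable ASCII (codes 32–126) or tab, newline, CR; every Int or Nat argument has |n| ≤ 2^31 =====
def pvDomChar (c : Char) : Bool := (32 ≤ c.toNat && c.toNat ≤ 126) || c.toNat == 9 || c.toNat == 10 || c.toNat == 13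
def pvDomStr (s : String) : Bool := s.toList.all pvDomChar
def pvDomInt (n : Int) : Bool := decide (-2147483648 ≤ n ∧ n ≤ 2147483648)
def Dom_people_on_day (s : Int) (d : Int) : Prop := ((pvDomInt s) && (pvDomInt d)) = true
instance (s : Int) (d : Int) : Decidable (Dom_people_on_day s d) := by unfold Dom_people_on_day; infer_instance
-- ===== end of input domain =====

-- B replaces A's doubling + binary search by one forward accumulation loop (simpler, not faster).


-- ===== PORT A =====
-- total(n) = n*(n+1)//2 - (s-1)*s//2 (A's inner helper, closing over s)
def pvTotal (s n : Int) : Int :=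
  PySem.Int.floordiv (n * (n + 1)) 2 - PySem.Int.floordiv ((s - 1) * s) 2

-- `while total(high) < d: high *= 2`; fuel makes the loop total (64 doublings
-- always suffice on Dom ∧ Pre, proved below; A's loop is unbounded).
def pvGrow (s d : Int) : Nat → Int → Int
  | 0, high => high
  | fuel + 1, high =>
      if pvTotal s high < d then pvGrow s d fuel (high * 2) else high

-- `while low < high: mid = (low+high)//2; …` — well-founded on the gap.
def pvBS (s d low high : Int) : Int :=
  if h : low < high then
    let mid := PySem.Int.floordiv (low + high) 2
    if d ≤ pvTotal s mid then pvBS s d low mid else pvBS s d (mid + 1) high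
  else low
termination_by (high - low).toNat
decreasing_by
  · have hb := PySem.Int.floordiv_two_mid_bounds (le_of_lt h)
    have : PySem.Int.floordiv (low + high) 2 < high := by
      rw [PySem.Int.floordiv_eq_ediv_of_pos (by omega)]; omega
    simp only [mid] at *; omega
  · have : low ≤ PySem.Int.floordiv (low + high) 2 := by
      rw [PySem.Int.floordiv_eq_ediv_of_pos (by omega)]; omega
    simp only [mid] at *; omega

def people_on_day (s : Int) (d : Int) : Int :=
  pvBS s d s (pvGrow s d 64 s)

-- ===== PORT B =====
-- `while t < d: n += 1; t += n`; fuel makes the loop total (the bound covers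
-- every input: ≤ -s steps to reach n = 0 and then ≤ d - total(0) more, each
-- adding at least 1; on Pre_ the adequacy is proved below; B's loop is unbounded).
def pvLoopB (d : Int) : Nat → Int → Int → Int
  | 0, n, _ => n
  | fuel + 1, n, t => if t < d then pvLoopB d fuel (n + 1) (t + (n + 1)) else n

def people_on_day_alt (s : Int) (d : Int) : Int :=
  pvLoopB d ((d - s).toNat + (s * s).toNat + 1) s s

-- ===== PRECONDITION & SPEC =====
-- Pre_ excludes s ≤ 0 with d > s: there A diverges (s = 0) or returns the start
-- day s only because the doubling loop overshoots downward and leaves an empty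
-- binary-search range (s < 0) — a degenerate corner no caller would specify;
-- B does the natural forward count there.
def Pre_people_on_day (s : Int) (d : Int) : Prop := 1 ≤ s ∨ d ≤ s
instance (s : Int) (d : Int) : Decidable (Pre_people_on_day s d) := by unfold Pre_people_on_day; infer_instance
def pvWitness_people_on_day : Int × Int := (3, 7)

def Spec_people_on_day (s : Int) (d : Int) (out : Int) : Prop := out = people_on_day_alt s d
instance (s : Int) (d : Int) (out : Int) : Decidable (Spec_people_on_day s d out) := by unfold Spec_people_on_day; infer_instance

-- ===== CLAIM (what is proved, stated in full; the proofs are below) =====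
def Claim_equal_people_on_day : Prop := ∀ (s : Int) (d : Int), Dom_people_on_day s d → Pre_people_on_day s d → Spec_people_on_day s d (people_on_day s d)

-- ===== LEMMAS AND PROOFS =====

-- pvTotal steps by n+1
theorem pvTotal_succ (s n : Int) : pvTotal s (n + 1) = pvTotal s n + (n + 1) := by
  obtain ⟨k, hk⟩ := Int.even_mul_succ_self n
  have h1 : n * (n + 1) = 2 * k := by omega
  have h2 : (n + 1) * (n + 1 + 1) = 2 * (k + (n + 1)) := by linear_combination h1
  unfold pvTotal
  rw [h1, h2, PySem.Int.floordiv_eq_ediv_of_pos (by omega),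
    PySem.Int.floordiv_eq_ediv_of_pos (a := 2 * k) (by omega)]
  omega

theorem pvTotal_self (s : Int) : pvTotal s s = s := by
  obtain ⟨k, hk⟩ := Int.even_mul_succ_self (s - 1)
  have h1 : (s - 1) * s = 2 * k := by linear_combination hk
  have h2 : s * (s + 1) = 2 * (k + s) := by linear_combination hk
  unfold pvTotal
  rw [h1, h2, PySem.Int.floordiv_eq_ediv_of_pos (by omega),
    PySem.Int.floordiv_eq_ediv_of_pos (a := 2 * k) (by omega)]
  omega

theorem pvTotal_mono (s : Int) (hs : 1 ≤ s) {m n : Int} (hm : s ≤ m) (hmn : m ≤ n) :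
    pvTotal s m ≤ pvTotal s n := by
  induction n, hmn using Int.le_induction with
  | base => exact le_refl _
  | succ k hk ih => rw [pvTotal_succ]; omega

theorem pvTotal_ge (s : Int) (hs : 1 ≤ s) {n : Int} (hn : s ≤ n) : n ≤ pvTotal s n := by
  induction n, hn using Int.le_induction with
  | base => rw [pvTotal_self]
  | succ k hk ih => rw [pvTotal_succ]; omega

-- "r is the least day ≥ s whose total reaches d"
def pvLeast (s d r : Int) : Prop :=
  s ≤ r ∧ d ≤ pvTotal s r ∧ ∀ m, s ≤ m → m < r → pvTotal s m < d

theorem pvLeast_unique {s d r r' : Int} (h : pvLeast s d r) (h' : pvLeast s d r') : r = r' := by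
  obtain ⟨h1, h2, h3⟩ := h
  obtain ⟨h1', h2', h3'⟩ := h'
  rcases lt_trichotomy r r' with hlt | he | hgt
  · exact absurd h2 (not_le.mpr (h3' r h1 hlt))
  · exact he
  · exact absurd h2' (not_le.mpr (h3 r' h1' hgt))

theorem pvLoopB_least (s d : Int) (hs : 1 ≤ s) :
    ∀ (fuel : Nat) (n t : Int), s ≤ n → t = pvTotal s n → d ≤ t + fuel →
    (∀ m, s ≤ m → m < n → pvTotal s m < d) → pvLeast s d (pvLoopB d fuel n t) := by
  intro fuel
  induction fuel with
  | zero =>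
    intro n t hn ht hf hinv
    simp only [pvLoopB]
    exact ⟨hn, by omega, hinv⟩
  | succ f ih =>
    intro n t hn ht hf hinv
    simp only [pvLoopB]
    split
    · rename_i hlt
      refine ih (n + 1) (t + (n + 1)) (by omega) (by rw [pvTotal_succ]; omega) (by push_cast at hf ⊢; omega) ?_
      intro m hm hmn
      rcases lt_or_ge m n with h | h
      · exact hinv m hm h
      · have : m = n := by omega
        subst this; omega
    · exact ⟨hn, by omega, hinv⟩

theorem pvGrow_spec (s d : Int) (hs : 1 ≤ s) :
    ∀ (fuel : Nat) (high : Int), s ≤ high → d ≤ 2 ^ fuel * high →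
    s ≤ pvGrow s d fuel high ∧ d ≤ pvTotal s (pvGrow s d fuel high) := by
  intro fuel
  induction fuel with
  | zero =>
    intro high hh hd
    simp only [pvGrow]
    have := pvTotal_ge s hs hh
    constructor
    · exact hh
    · simp only [pow_zero, one_mul] at hd; omega
  | succ f ih =>
    intro high hh hd
    simp only [pvGrow]
    split
    · refine ih (high * 2) (by omega) ?_
      have : 2 ^ f * (high * 2) = 2 ^ (f + 1) * high := by ring
      omega
    · exact ⟨hh, by omega⟩

theorem pvBS_least (s d : Int) (hs : 1 ≤ s) :
    ∀ (low high : Int), s ≤ low → low ≤ high → d ≤ pvTotal s high →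
    (∀ m, s ≤ m → m < low → pvTotal s m < d) → pvLeast s d (pvBS s d low high) := by
  intro low high
  induction low, high using pvBS.induct s d with
  | case1 low high h mid hmid ih =>
    intro hsl hlh hdh hinv
    rw [pvBS]
    simp only [h, dite_true]
    have hb := PySem.Int.floordiv_two_mid_bounds (le_of_lt h)
    have hmlt : PySem.Int.floordiv (low + high) 2 < high := by
      rw [PySem.Int.floordiv_eq_ediv_of_pos (by omega)]; omega
    rw [if_pos hmid]
    exact ih hsl (by omega) hmid hinv
  | case2 low high h mid hmid ih =>
    intro hsl hlh hdh hinv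
    have hmeq : mid = PySem.Int.floordiv (low + high) 2 := rfl
    have hb := PySem.Int.floordiv_two_mid_bounds (le_of_lt h)
    have hmlt : PySem.Int.floordiv (low + high) 2 < high := by
      rw [PySem.Int.floordiv_eq_ediv_of_pos (by omega)]; omega
    rw [pvBS]
    simp only [h, dite_true]
    rw [if_neg hmid]
    refine ih (by omega) (by omega) hdh ?_
    intro m hm hmlt
    rcases lt_or_ge m low with h' | h'
    · exact hinv m hm h'
    · have := pvTotal_mono s hs (m := m) (n := mid) (by omega) (by omega)
      omega
  | case3 low high h =>
    intro hsl hlh hdh hinv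
    rw [pvBS]
    simp only [h, dite_false]
    have : low = high := by omega
    subst this
    exact ⟨hsl, hdh, hinv⟩

theorem pvLoopB_base (d : Int) (fuel : Nat) (n t : Int) (h : ¬ t < d) :
    pvLoopB d (fuel + 1) n t = n := by
  simp [pvLoopB, h]

theorem people_on_day_spec : Claim_equal_people_on_day := by
  intro s d hdom hpre
  unfold Spec_people_on_day
  by_cases hs : 1 ≤ s
  · -- main case: both sides compute the least day ≥ s with total ≥ d
    have hdomd : d ≤ 2147483648 := by
      unfold Dom_people_on_day pvDomInt at hdom
      simp only [Bool.and_eq_true, decide_eq_true_eq] at hdom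
      omega
    have hgrow := pvGrow_spec s d hs 64 s (le_refl s) (by nlinarith [pow_pos (show (0:Int) < 2 by norm_num) 64, show (2:Int)^64 = 18446744073709551616 by norm_num])
    have hA : pvLeast s d (people_on_day s d) := by
      unfold people_on_day
      exact pvBS_least s d hs s _ (le_refl s) hgrow.1 hgrow.2 (fun m hm hlt => by omega)
    have hB : pvLeast s d (people_on_day_alt s d) := by
      unfold people_on_day_alt
      refine pvLoopB_least s d hs _ s s (le_refl s) (pvTotal_self s).symm ?_ (fun m hm hlt => by omega)
      push_cast
      omega
    exact pvLeast_unique hA hB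
  · -- then d ≤ s: both return s immediately
    have hds : d ≤ s := hpre.resolve_left hs
    have ht : ¬ pvTotal s s < d := by rw [pvTotal_self]; omega
    have hA : people_on_day s d = s := by
      unfold people_on_day
      have hg : pvGrow s d 64 s = s := by
        show pvGrow s d (63 + 1) s = s
        simp only [pvGrow, ht, if_false]
      rw [hg, pvBS]
      simp
    have hB : people_on_day_alt s d = s := by
      unfold people_on_day_alt
      exact pvLoopB_base d _ s s (by omega)
    rw [hA, hB]
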